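-- pv_equiv track=rewrite | github.com/luisfpereira/geomstats-tools | src/geomstats_tools/sort_data_methods/utils.py | split_class
-- ===== SOURCE A (Python) =====
-- def _is_function_def_start(line, indentation):
--     if line.startswith(f"{indentation}def") or line.startswith(f"{indentation}@"):
--         return True
--
--     return False
--
-- def _get_function_name_from_def(line):
--     line = line.strip()
--     return line[4:line.index("(")]
--
-- def split_class(class_source):
--     # naive split using def
--
--     header = []
--     line = ""
--     i = 0
--     while True:
--         # TODO: class with no methods
--         line = class_source[i]
--         stripped_line = line.strip()
--         if stripped_line.startswith("def") or stripped_line.startswith("@"):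
--             indentation = " " * line.index("d")
--             break
--
--         header.append(line)
--         i += 1
--
--     class_ = {"header": header}
--
--     cls_name = ""
--     cls_lines = []
--     for line in class_source[i:]:
--         if _is_function_def_start(line, indentation) and cls_name:
--             if cls_lines:
--                 class_[cls_name] = cls_lines
--
--             cls_name = ""
--             cls_lines = []
--
--         if line.startswith(f"{indentation}def"):
--             cls_name = _get_function_name_from_def(line)
--
--         cls_lines.append(line)
--
--     if cls_lines:
--         class_[cls_name] = cls_lines
--
--     return class_
-- ===== SOURCE B (Python) =====
-- def _name_of(line):
--     stripped = line.strip()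
--     return stripped[4:stripped.index("(")]
--
--
-- def _grab(seen_def, lines, def_prefix, dec_prefix):
--     """Consume lines until the next block start after a def; return
--     (consumed lines, remaining lines)."""
--     seg = []
--     for k, line in enumerate(lines):
--         if seen_def and (line.startswith(def_prefix) or line.startswith(dec_prefix)):
--             return seg, lines[k:]
--         if line.startswith(def_prefix):
--             seen_def = True
--         seg.append(line)
--     return seg, []
--
--
-- def split_class(class_source):
--     # block-at-a-time decomposition: peel off one whole method block per
--     # outer step, then name each block from its def line
--     split = next(
--         i for i, line in enumerate(class_source)
--         if line.strip().startswith(("def", "@"))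
--     )
--     header, body = class_source[:split], class_source[split:]
--     indentation = " " * body[0].index("d")
--     def_prefix = indentation + "def"
--     dec_prefix = indentation + "@"
--
--     result = {"header": header}
--     rest = body
--     while rest:
--         first, tail = rest[0], rest[1:]
--         seg_tail, rest = _grab(first.startswith(def_prefix), tail, def_prefix, dec_prefix)
--         seg = [first] + seg_tail
--         name = next((_name_of(l) for l in seg if l.startswith(def_prefix)), "")
--         result[name] = seg
--     return result
-- ===== Notes on version B (the rewrite author's own statement) =====
-- stated objective: alternative
-- what changed: A is a single-pass state machine carrying (dict, current name, current lines) and flushing mid-stream; B peels off one whole method block at a time with an inner scan (_grab) and then names each complete block, so no flush/accumulator state is carried. Pre_ additionally excludes inputs containing a malformed method-def line (no '(' -- A raises ValueError -- or nothing between 'def' and '(', invalid Python on which A's grouping by a carried empty name and B's grouping are both accidental).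
-- outside the precondition, e.g. on split_class(['def f:']): A raises ValueError, B raises ValueError
import Mathlib
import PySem

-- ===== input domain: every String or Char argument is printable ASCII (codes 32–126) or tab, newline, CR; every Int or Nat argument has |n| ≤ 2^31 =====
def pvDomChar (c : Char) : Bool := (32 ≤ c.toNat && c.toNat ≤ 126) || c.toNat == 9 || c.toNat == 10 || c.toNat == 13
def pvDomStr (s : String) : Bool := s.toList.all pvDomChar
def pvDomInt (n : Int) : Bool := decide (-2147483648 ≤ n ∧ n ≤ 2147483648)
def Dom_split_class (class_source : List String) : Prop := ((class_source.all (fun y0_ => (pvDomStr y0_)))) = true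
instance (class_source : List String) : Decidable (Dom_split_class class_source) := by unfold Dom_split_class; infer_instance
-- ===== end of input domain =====

-- B peels one whole method block per outer step (inner scan, then names the block) instead of
-- A's flat state machine with mid-stream flushes; objective: alternative decomposition, same cost.

-- ===== PORT A =====

def pvIsFunctionDefStart (line indentation : String) : Bool :=
  PySem.Str.startswith line (String.ofList (indentation.toList ++ "def".toList)) ||
  PySem.Str.startswith line (String.ofList (indentation.toList ++ ['@']))

-- line[4:line.index("(")] on the stripped line; Python raises ValueError when '(' is absent
-- (find = -1); Pre_ excludes those inputs, the port's value there is junk.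
def pvGetFunctionNameFromDef (line : String) : String :=
  let stripped := PySem.Str.strip line
  PySem.Str.slice stripped (some 4) (some (PySem.Str.find stripped "("))

def pvStartsDefOrAt (line : String) : Bool :=
  PySem.Str.startswith (PySem.Str.strip line) "def" || PySem.Str.startswith (PySem.Str.strip line) "@"

-- A's first 'while True' loop: header lines until the first def/@ line.
-- none = Python raises (IndexError past the end / ValueError when that line has no 'd'); Pre_ excludes.
def pvHeaderLoop : List String → List String → Option (List String × String × List String)
  | [], _ => none
  | line :: restL, header =>
    if pvStartsDefOrAt line then
      let d := PySem.Str.find line "d"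
      if d < 0 then none
      else some (header, String.ofList (List.replicate d.toNat ' '), line :: restL)
    else pvHeaderLoop restL (header ++ [line])

-- one iteration of A's 'for line in class_source[i:]' loop; state = (class_, cls_name, cls_lines)
def pvStepA (indentation : String)
    (st : PySem.Dict String (List String) × String × List String) (line : String) :
    PySem.Dict String (List String) × String × List String :=
  let st1 := if pvIsFunctionDefStart line indentation && !(st.2.1 == "") then
               ((if st.2.2 == ([] : List String) then st.1 else st.1.insert st.2.1 st.2.2), "",
                ([] : List String))
             else st
  let name := if PySem.Str.startswith line (String.ofList (indentation.toList ++ "def".toList)) then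
                pvGetFunctionNameFromDef line
              else st1.2.1
  (st1.1, name, st1.2.2 ++ [line])

-- A's trailing 'if cls_lines: class_[cls_name] = cls_lines'
def pvFinalFlush (st : PySem.Dict String (List String) × String × List String) :
    PySem.Dict String (List String) :=
  if st.2.2 == ([] : List String) then st.1 else st.1.insert st.2.1 st.2.2

def split_class (class_source : List String) : List (String × List String) :=
  match pvHeaderLoop class_source [] with
  | none => []    -- Python raises here; Pre_ excludes
  | some (header, indentation, rest) =>
    (pvFinalFlush (rest.foldl (pvStepA indentation)
      (PySem.Dict.ofList [("header", header)], "", ([] : List String)))).items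

-- ===== PORT B =====

def pvNameOf (line : String) : String :=
  let stripped := PySem.Str.strip line
  PySem.Str.slice stripped (some 4) (some (PySem.Str.find stripped "("))

def pvIsStartB (line : String) : Bool :=
  PySem.Str.startswith (PySem.Str.strip line) "def" || PySem.Str.startswith (PySem.Str.strip line) "@"

-- B's _grab: consume lines until the next block start after a def line
def pvGrab (defPrefix decPrefix : String) : Bool → List String → List String × List String
  | _, [] => ([], [])
  | seen, line :: rest =>
    if seen && (PySem.Str.startswith line defPrefix || PySem.Str.startswith line decPrefix) then
      ([], line :: rest)
    else
      let pr := pvGrab defPrefix decPrefix (seen || PySem.Str.startswith line defPrefix) rest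
      (line :: pr.1, pr.2)

-- termination measure for pvBlocks (cited in decreasing_by)
theorem pvGrab_rest_length_le (defPrefix decPrefix : String) (seen : Bool) (lines : List String) :
    (pvGrab defPrefix decPrefix seen lines).2.length ≤ lines.length := by
  induction lines generalizing seen with
  | nil => simp [pvGrab]
  | cons l rest ih =>
    simp only [pvGrab]
    split
    · simp
    · exact le_trans (ih _) (Nat.le_succ _)

-- B's outer 'while rest:' loop: the list of method blocks
def pvBlocks (defPrefix decPrefix : String) (lines : List String) : List (List String) :=
  match lines with
  | [] => []
  | first :: tail =>
    let pr := pvGrab defPrefix decPrefix (PySem.Str.startswith first defPrefix) tail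
    (first :: pr.1) :: pvBlocks defPrefix decPrefix pr.2
termination_by lines.length
decreasing_by
  exact Nat.lt_succ_of_le (pvGrab_rest_length_le _ _ _ _)

-- B's 'next((_name_of(l) for l in seg if l.startswith(def_prefix)), "")'
def pvBlockName (defPrefix : String) (seg : List String) : String :=
  match seg.find? (fun l => PySem.Str.startswith l defPrefix) with
  | some l => pvNameOf l
  | none => ""

def split_class_alt (class_source : List String) : List (String × List String) :=
  let split := class_source.findIdx pvIsStartB
  let header := class_source.take split
  let body := class_source.drop split
  match body with
  | [] => []    -- Python: next(...) raises StopIteration; Pre_ excludes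
  | b0 :: _ =>
    let d := PySem.Str.find b0 "d"
    if d < 0 then []    -- Python: body[0].index("d") raises ValueError; Pre_ excludes
    else
      let indentation := List.replicate d.toNat ' '
      let defPrefix := String.ofList (indentation ++ "def".toList)
      let decPrefix := String.ofList (indentation ++ ['@'])
      ((pvBlocks defPrefix decPrefix body).foldl
        (fun dd seg => dd.insert (pvBlockName defPrefix seg) seg)
        (PySem.Dict.ofList [("header", header)])).items

-- ===== PRECONDITION & SPEC =====
-- Pre_ excludes (a) inputs where Python A raises: no line whose stripped form starts with "def"/"@"
-- (IndexError), the first such line containing no 'd' (ValueError in line.index("d")), a method-def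
-- line with no '(' (ValueError in _get_function_name_from_def); and (b) inputs with a malformed
-- method-def line with nothing between "def" and "(" (invalid Python; A's grouping by a carried
-- empty name there is accidental and B's is equally so). Both are "find '(' in stripped ≥ 5".
def Pre_split_class (class_source : List String) : Prop :=
  let rest := class_source.dropWhile (fun l =>
    !(PySem.Str.startswith (PySem.Str.strip l) "def" || PySem.Str.startswith (PySem.Str.strip l) "@"))
  rest ≠ [] ∧
  PySem.Str.find (rest.headD "") "d" ≠ -1 ∧
  ∀ l ∈ rest,
    PySem.Str.startswith l
      (String.ofList (List.replicate (PySem.Str.find (rest.headD "") "d").toNat ' ' ++ "def".toList))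
      = true →
    5 ≤ PySem.Str.find (PySem.Str.strip l) "("

instance (class_source : List String) : Decidable (Pre_split_class class_source) := by
  unfold Pre_split_class; infer_instance

def pvWitness_split_class : List String :=
  ["class A:", "    def f(x):", "        return x", "    @prop", "    def g(y):", "        pass"]

def Spec_split_class (class_source : List String) (out : List (String × List String)) : Prop :=
  out = split_class_alt class_source
instance (class_source : List String) (out : List (String × List String)) :
    Decidable (Spec_split_class class_source out) := by unfold Spec_split_class; infer_instance

-- ===== CLAIM (what is proved, stated in full; the proofs are below) =====
def Claim_equal_split_class : Prop := ∀ (class_source : List String),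
  Dom_split_class class_source → Pre_split_class class_source →
  Spec_split_class class_source (split_class class_source)

-- ===== LEMMAS AND PROOFS =====

def pvDP (ind : String) : String := String.ofList (ind.toList ++ "def".toList)
def pvDC (ind : String) : String := String.ofList (ind.toList ++ ['@'])

-- 'every def line at this indentation extracts a nonempty name' (Pre_'s third conjunct supplies it)
def pvGoodL (ind l : String) : Prop :=
  PySem.Str.startswith l (pvDP ind) = true → (pvGetFunctionNameFromDef l == "") = false

-- the name A's streaming state carries after processing the lines s starting from name
def pvNA (ind : String) (name : String) (s : List String) : String :=
  s.foldl (fun n l => if PySem.Str.startswith l (pvDP ind) then pvGetFunctionNameFromDef l else n) name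

theorem pvNameOf_eq : pvNameOf = pvGetFunctionNameFromDef := rfl

theorem pvIFDS_eq (ind l : String) :
    pvIsFunctionDefStart l ind
      = (PySem.Str.startswith l (pvDP ind) || PySem.Str.startswith l (pvDC ind)) := rfl

theorem pvGrab_cons_stop {seen : Bool} {y : String} (defPrefix decPrefix : String)
    (rest : List String)
    (h : (seen && (PySem.Str.startswith y defPrefix || PySem.Str.startswith y decPrefix)) = true) :
    pvGrab defPrefix decPrefix seen (y :: rest) = ([], y :: rest) := by
  simp only [pvGrab]
  rw [if_pos h]

theorem pvGrab_cons_go {seen : Bool} {y : String} (defPrefix decPrefix : String)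
    (rest : List String)
    (h : (seen && (PySem.Str.startswith y defPrefix || PySem.Str.startswith y decPrefix)) = false) :
    pvGrab defPrefix decPrefix seen (y :: rest)
      = (y :: (pvGrab defPrefix decPrefix (seen || PySem.Str.startswith y defPrefix) rest).1,
         (pvGrab defPrefix decPrefix (seen || PySem.Str.startswith y defPrefix) rest).2) := by
  simp only [pvGrab]
  rw [if_neg (by simp only [h]; exact Bool.false_ne_true)]

theorem pvNA_cons (ind name y : String) (s : List String) :
    pvNA ind name (y :: s)
      = pvNA ind (if PySem.Str.startswith y (pvDP ind) then pvGetFunctionNameFromDef y else name) s := rfl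

theorem pvBlockName_cons (defPrefix y : String) (s : List String) :
    pvBlockName defPrefix (y :: s)
      = if PySem.Str.startswith y defPrefix then pvNameOf y else pvBlockName defPrefix s := by
  simp only [pvBlockName, List.find?_cons]
  cases h : PySem.Str.startswith y defPrefix <;> simp

-- if the grab-continue branch is taken while seen, the line is not a block start
theorem pvGo_not_start {ind : String} {seen : Bool} {y : String}
    (h : (seen && (PySem.Str.startswith y (pvDP ind) || PySem.Str.startswith y (pvDC ind))) = false)
    (hn : seen = true) : pvIsFunctionDefStart y ind = false := by
  rw [pvIFDS_eq]; subst hn; simpa using h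

-- the state invariant: the carried name is nonempty iff B's seen-def flag is set
theorem pvInvStep (ind : String) (y : String) (seen : Bool) (name : String)
    (hy : pvGoodL ind y) (hinv : (name == "") = !seen) :
    (((if PySem.Str.startswith y (pvDP ind) then pvGetFunctionNameFromDef y else name) == "")
      = !(seen || PySem.Str.startswith y (pvDP ind))) := by
  cases hD : PySem.Str.startswith y (pvDP ind) with
  | true =>
    rw [if_pos rfl, hy hD]
    simp
  | false =>
    rw [if_neg Bool.false_ne_true, Bool.or_false, hinv]

-- no flush happens while A is inside the block pvGrab consumes
theorem pvNoFlush (ind : String) :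
    ∀ (lines : List String) (seen : Bool) (d : PySem.Dict String (List String))
      (name : String) (acc : List String),
    (∀ l ∈ lines, pvGoodL ind l) → (name == "") = !seen →
    lines.foldl (pvStepA ind) (d, name, acc)
      = (pvGrab (pvDP ind) (pvDC ind) seen lines).2.foldl (pvStepA ind)
          (d, pvNA ind name (pvGrab (pvDP ind) (pvDC ind) seen lines).1,
           acc ++ (pvGrab (pvDP ind) (pvDC ind) seen lines).1) := by
  intro lines
  induction lines with
  | nil => intro seen d name acc _ _; simp [pvGrab, pvNA]
  | cons y rest ih =>
    intro seen d name acc hG hinv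
    by_cases hs : (seen && (PySem.Str.startswith y (pvDP ind) || PySem.Str.startswith y (pvDC ind))) = true
    · rw [pvGrab_cons_stop _ _ _ hs]
      simp [pvNA]
    · have hs' : (seen && (PySem.Str.startswith y (pvDP ind) || PySem.Str.startswith y (pvDC ind))) = false := Bool.eq_false_iff.mpr hs
      rw [pvGrab_cons_go _ _ _ hs']
      have hflush : (pvIsFunctionDefStart y ind && !(name == "")) = false := by
        cases hn : seen with
        | false => rw [hinv, hn]; simp
        | true => rw [pvGo_not_start hs' hn]; simp
      have hstep : pvStepA ind (d, name, acc) y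
          = (d, (if PySem.Str.startswith y (pvDP ind) then pvGetFunctionNameFromDef y else name),
             acc ++ [y]) := by
        simp [pvStepA, hflush, pvDP]
      rw [List.foldl_cons, hstep,
        ih (seen || PySem.Str.startswith y (pvDP ind)) d _ (acc ++ [y])
          (fun l hl => hG l (List.mem_cons_of_mem _ hl))
          (pvInvStep ind y seen name (hG y List.mem_cons_self) hinv),
        pvNA_cons]
      simp

-- when pvGrab stops with lines remaining, the next line is a block start and the carried name is nonempty
theorem pvGrabStop (ind : String) :
    ∀ (lines : List String) (seen : Bool) (name : String),
    (∀ l ∈ lines, pvGoodL ind l) → (name == "") = !seen →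
    ∀ z zs, (pvGrab (pvDP ind) (pvDC ind) seen lines).2 = z :: zs →
      pvIsFunctionDefStart z ind = true ∧
      (pvNA ind name (pvGrab (pvDP ind) (pvDC ind) seen lines).1 == "") = false := by
  intro lines
  induction lines with
  | nil => intro seen name _ _ z zs h; simp [pvGrab] at h
  | cons y rest ih =>
    intro seen name hG hinv z zs h
    by_cases hs : (seen && (PySem.Str.startswith y (pvDP ind) || PySem.Str.startswith y (pvDC ind))) = true
    · rw [pvGrab_cons_stop _ _ _ hs] at h ⊢
      obtain ⟨hz, -⟩ := List.cons.injEq _ _ _ _ ▸ h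
      have h1 := (Bool.and_eq_true _ _).mp hs
      refine ⟨?_, ?_⟩
      · subst hz; rw [pvIFDS_eq]; exact h1.2
      · simp only [pvNA, List.foldl_nil]
        rw [hinv, h1.1]; rfl
    · have hs' : (seen && (PySem.Str.startswith y (pvDP ind) || PySem.Str.startswith y (pvDC ind))) = false := Bool.eq_false_iff.mpr hs
      rw [pvGrab_cons_go _ _ _ hs'] at h ⊢
      have := ih (seen || PySem.Str.startswith y (pvDP ind))
        (if PySem.Str.startswith y (pvDP ind) then pvGetFunctionNameFromDef y else name)
        (fun l hl => hG l (List.mem_cons_of_mem _ hl))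
        (pvInvStep ind y seen name (hG y List.mem_cons_self) hinv) z zs h
      refine ⟨this.1, ?_⟩
      rw [pvNA_cons]
      exact this.2

-- the name A carries at the end of a block equals B's name for that block
theorem pvNameLemma (ind : String) :
    ∀ (lines : List String) (seen : Bool) (name : String),
    (∀ l ∈ lines, pvGoodL ind l) → (name == "") = !seen →
    pvNA ind name (pvGrab (pvDP ind) (pvDC ind) seen lines).1
      = if seen = true then name
        else pvBlockName (pvDP ind) (pvGrab (pvDP ind) (pvDC ind) seen lines).1 := by
  intro lines
  induction lines with
  | nil =>
    intro seen name _ hinv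
    cases hn : seen with
    | true => simp [pvGrab, pvNA]
    | false =>
      rw [hn] at hinv; simp at hinv
      simp [pvGrab, pvNA, pvBlockName, hinv]
  | cons y rest ih =>
    intro seen name hG hinv
    by_cases hs : (seen && (PySem.Str.startswith y (pvDP ind) || PySem.Str.startswith y (pvDC ind))) = true
    · have hn : seen = true := ((Bool.and_eq_true _ _).mp hs).1
      rw [pvGrab_cons_stop _ _ _ hs, hn]
      simp [pvNA]
    · have hs' : (seen && (PySem.Str.startswith y (pvDP ind) || PySem.Str.startswith y (pvDC ind))) = false := Bool.eq_false_iff.mpr hs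
      rw [pvGrab_cons_go _ _ _ hs', pvNA_cons, pvBlockName_cons]
      cases hD : PySem.Str.startswith y (pvDP ind) with
      | true =>
        have hn : seen = false := by
          cases hn : seen with
          | false => rfl
          | true =>
            exfalso
            have hh := pvGo_not_start hs' hn
            rw [pvIFDS_eq, hD] at hh
            simp at hh
        subst hn
        have hne := hG y List.mem_cons_self hD
        have hrec := ih true (pvGetFunctionNameFromDef y)
          (fun l hl => hG l (List.mem_cons_of_mem _ hl)) (by rw [hne]; rfl)
        simp only [] at hrec
        simp [pvNameOf_eq, hrec]
      | false =>
        rw [if_neg Bool.false_ne_true, if_neg Bool.false_ne_true,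
          ih (seen || false) name (fun l hl => hG l (List.mem_cons_of_mem _ hl))
            (by rw [Bool.or_false]; exact hinv)]
        cases hn : seen <;> simp

theorem pvIsStartB_eq : pvIsStartB = pvStartsDefOrAt := rfl

-- the fresh-segment first step of A's loop
theorem pvStep0 (ind x : String) (d : PySem.Dict String (List String)) :
    pvStepA ind (d, "", ([] : List String)) x
      = (d, (if PySem.Str.startswith x (pvDP ind) then pvGetFunctionNameFromDef x else ""), [x]) := by
  simp [pvStepA, pvDP]

-- A's first loop in closed form: takeWhile/dropWhile at the first def/@ line
theorem pvHeaderLoop_eq :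
    ∀ (cs acc : List String),
    pvHeaderLoop cs acc
      = match cs.dropWhile (fun l => !pvStartsDefOrAt l) with
        | [] => none
        | l0 :: rest =>
          if PySem.Str.find l0 "d" < 0 then none
          else some (acc ++ cs.takeWhile (fun l => !pvStartsDefOrAt l),
                     String.ofList (List.replicate (PySem.Str.find l0 "d").toNat ' '), l0 :: rest) := by
  intro cs
  induction cs with
  | nil => intro acc; simp [pvHeaderLoop, List.dropWhile]
  | cons x xs ih =>
    intro acc
    cases hx : pvStartsDefOrAt x with
    | true => simp [pvHeaderLoop, hx, List.dropWhile, List.takeWhile]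
    | false =>
      have h1 : pvHeaderLoop (x :: xs) acc = pvHeaderLoop xs (acc ++ [x]) := by
        simp only [pvHeaderLoop]
        rw [if_neg (by simp only [hx]; exact Bool.false_ne_true)]
      have h2 : (x :: xs).dropWhile (fun l => !pvStartsDefOrAt l)
          = xs.dropWhile (fun l => !pvStartsDefOrAt l) := by
        simp [hx]
      have h3 : (x :: xs).takeWhile (fun l => !pvStartsDefOrAt l)
          = x :: xs.takeWhile (fun l => !pvStartsDefOrAt l) := by
        simp [hx]
      rw [h1, h2, h3, ih (acc ++ [x])]
      cases hdw : xs.dropWhile (fun l => !pvStartsDefOrAt l) with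
      | nil => rfl
      | cons l0 r => simp [List.append_assoc]

theorem pvTake_findIdx (p : String → Bool) (cs : List String) :
    cs.take (cs.findIdx p) = cs.takeWhile (fun x => !p x) := by
  induction cs with
  | nil => rfl
  | cons x xs ih =>
    simp [List.findIdx_cons, List.takeWhile]
    cases h : p x <;> simp [ih]

theorem pvDrop_findIdx (p : String → Bool) (cs : List String) :
    cs.drop (cs.findIdx p) = cs.dropWhile (fun x => !p x) := by
  induction cs with
  | nil => rfl
  | cons x xs ih =>
    simp [List.findIdx_cons, List.dropWhile]
    cases h : p x <;> simp [ih]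

theorem pvDP_ofList (r : List Char) :
    pvDP (String.ofList r) = String.ofList (r ++ "def".toList) := by simp [pvDP]

theorem pvDC_ofList (r : List Char) :
    pvDC (String.ofList r) = String.ofList (r ++ ['@']) := by simp [pvDC]

-- a def line whose '(' sits at index ≥ 5 of its stripped form extracts a nonempty name
theorem pvPreGood (l : String) (h5 : 5 ≤ PySem.Str.find (PySem.Str.strip l) "(") :
    (pvGetFunctionNameFromDef l == "") = false := by
  rw [beq_eq_false_iff_ne]
  intro h
  have htl := congrArg String.toList h
  simp only [pvGetFunctionNameFromDef, PySem.Str.toList_slice, String.toList_empty] at htl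
  set cs := (PySem.Str.strip l).toList with hcs
  have hfind : PySem.Str.find (PySem.Str.strip l) "(" = PySem.Chars.find cs ['('] := by
    simp [PySem.Str.find_eq, hcs]
  rw [hfind] at h5 htl
  set f := PySem.Chars.find cs ['('] with hf
  have h0 : (0:Int) ≤ f := by omega
  have hspec := (PySem.Chars.find_spec (s := cs) (sub := ['(']) h0).1
  have hlt : f.toNat < cs.length := by
    have hne : cs.drop f.toNat ≠ [] := by
      intro hnil
      rw [hnil] at hspec
      simp at hspec
    have := List.length_pos_iff.mpr hne
    simp only [List.length_drop] at this
    omega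
  rw [PySem.Chars.slice_eq_listSlice,
    PySem.List.slice_toNat cs (by norm_num : (0:Int) ≤ 4) h0] at htl
  have hlen := congrArg List.length htl
  simp only [List.length_take, List.length_drop, List.length_nil] at hlen
  have : (4:Int).toNat = 4 := rfl
  omega

-- lines pvGrab leaves unconsumed all come from the input list
theorem pvGrab_rest_mem (defPrefix decPrefix : String) :
    ∀ (lines : List String) (seen : Bool) (l : String),
    l ∈ (pvGrab defPrefix decPrefix seen lines).2 → l ∈ lines := by
  intro lines
  induction lines with
  | nil => intro seen l h; simp [pvGrab] at h
  | cons y rest ih =>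
    intro seen l h
    by_cases hs : (seen && (PySem.Str.startswith y defPrefix || PySem.Str.startswith y decPrefix)) = true
    · rw [pvGrab_cons_stop _ _ _ hs] at h; exact h
    · rw [pvGrab_cons_go _ _ _ (Bool.eq_false_iff.mpr hs)] at h
      exact List.mem_cons_of_mem _ (ih _ l h)

-- A's streaming loop (plus trailing flush) equals B's fold over the blocks
theorem pvMain (ind : String) :
    ∀ (n : Nat) (L : List String), L.length ≤ n → (∀ l ∈ L, pvGoodL ind l) →
    ∀ d : PySem.Dict String (List String),
    pvFinalFlush (L.foldl (pvStepA ind) (d, "", ([] : List String)))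
      = (pvBlocks (pvDP ind) (pvDC ind) L).foldl
          (fun dd seg => dd.insert (pvBlockName (pvDP ind) seg) seg) d := by
  intro n
  induction n with
  | zero =>
    intro L hL _ d
    have hnil : L = [] := List.eq_nil_of_length_eq_zero (Nat.le_zero.mp hL)
    subst hnil
    simp [pvBlocks, pvFinalFlush]
  | succ n ih =>
    intro L hL hG d
    cases L with
    | nil => simp [pvBlocks, pvFinalFlush]
    | cons x xs =>
      have hGx := hG x List.mem_cons_self
      have hGxs : ∀ l ∈ xs, pvGoodL ind l := fun l hl => hG l (List.mem_cons_of_mem _ hl)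
      have hinv0 : ((if PySem.Str.startswith x (pvDP ind) then pvGetFunctionNameFromDef x else "") == "")
          = !PySem.Str.startswith x (pvDP ind) := by
        have := pvInvStep ind x false "" hGx rfl
        rwa [Bool.false_or] at this
      rw [List.foldl_cons, pvStep0,
        pvNoFlush ind xs (PySem.Str.startswith x (pvDP ind)) d _ [x] hGxs hinv0]
      have hBlocks : pvBlocks (pvDP ind) (pvDC ind) (x :: xs)
          = (x :: (pvGrab (pvDP ind) (pvDC ind) (PySem.Str.startswith x (pvDP ind)) xs).1)
            :: pvBlocks (pvDP ind) (pvDC ind)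
                 (pvGrab (pvDP ind) (pvDC ind) (PySem.Str.startswith x (pvDP ind)) xs).2 := by
        rw [pvBlocks]
      have hname : pvNA ind (if PySem.Str.startswith x (pvDP ind) then pvGetFunctionNameFromDef x else "")
            (pvGrab (pvDP ind) (pvDC ind) (PySem.Str.startswith x (pvDP ind)) xs).1
          = pvBlockName (pvDP ind)
              (x :: (pvGrab (pvDP ind) (pvDC ind) (PySem.Str.startswith x (pvDP ind)) xs).1) := by
        rw [pvNameLemma ind xs _ _ hGxs hinv0, pvBlockName_cons]
        cases hD : PySem.Str.startswith x (pvDP ind) <;> simp [pvNameOf_eq]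
      cases hr : (pvGrab (pvDP ind) (pvDC ind) (PySem.Str.startswith x (pvDP ind)) xs).2 with
      | nil =>
        rw [List.foldl_nil, hBlocks, hr]
        simp only [pvBlocks, List.foldl_cons, List.foldl_nil, List.singleton_append, pvFinalFlush]
        rw [if_neg (by simp), hname]
      | cons z zs =>
        obtain ⟨hPz, hnf⟩ := pvGrabStop ind xs _ _ hGxs hinv0 z zs hr
        rw [List.foldl_cons]
        have hstepz : pvStepA ind
            (d, pvNA ind (if PySem.Str.startswith x (pvDP ind) then pvGetFunctionNameFromDef x else "")
                  (pvGrab (pvDP ind) (pvDC ind) (PySem.Str.startswith x (pvDP ind)) xs).1,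
             [x] ++ (pvGrab (pvDP ind) (pvDC ind) (PySem.Str.startswith x (pvDP ind)) xs).1) z
            = (d.insert
                 (pvNA ind (if PySem.Str.startswith x (pvDP ind) then pvGetFunctionNameFromDef x else "")
                   (pvGrab (pvDP ind) (pvDC ind) (PySem.Str.startswith x (pvDP ind)) xs).1)
                 (x :: (pvGrab (pvDP ind) (pvDC ind) (PySem.Str.startswith x (pvDP ind)) xs).1),
               (if PySem.Str.startswith z (pvDP ind) then pvGetFunctionNameFromDef z else ""), [z]) := by
          simp only [pvStepA]
          rw [hPz, hnf]
          simp [pvDP]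
        have hGz : ∀ l ∈ z :: zs, pvGoodL ind l := fun l hl =>
          hGxs l (pvGrab_rest_mem (pvDP ind) (pvDC ind) xs _ l (hr ▸ hl))
        have hlen : (z :: zs).length ≤ n := by
          have h1 := pvGrab_rest_length_le (pvDP ind) (pvDC ind) (PySem.Str.startswith x (pvDP ind)) xs
          rw [hr] at h1
          simp at hL h1 ⊢
          omega
        have hih := ih (z :: zs) hlen hGz
          (d.insert
            (pvNA ind (if PySem.Str.startswith x (pvDP ind) then pvGetFunctionNameFromDef x else "")
              (pvGrab (pvDP ind) (pvDC ind) (PySem.Str.startswith x (pvDP ind)) xs).1)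
            (x :: (pvGrab (pvDP ind) (pvDC ind) (PySem.Str.startswith x (pvDP ind)) xs).1))
        rw [List.foldl_cons, pvStep0] at hih
        rw [hstepz, hih, hBlocks, hr, List.foldl_cons, hname]

-- ===== VERDICT (by name: the statement is the Claim_ definition above) =====
theorem split_class_spec : Claim_equal_split_class := by
  unfold Claim_equal_split_class
  intro cs _ hpre
  unfold Spec_split_class
  obtain ⟨hne, hd, hgood⟩ := hpre
  have hne' : cs.dropWhile (fun l => !pvStartsDefOrAt l) ≠ [] := hne
  have hd' : PySem.Str.find ((cs.dropWhile (fun l => !pvStartsDefOrAt l)).headD "") "d" ≠ -1 := hd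
  have hgood' : ∀ l ∈ cs.dropWhile (fun l => !pvStartsDefOrAt l),
      PySem.Str.startswith l
        (String.ofList (List.replicate
          (PySem.Str.find ((cs.dropWhile (fun l => !pvStartsDefOrAt l)).headD "") "d").toNat ' '
          ++ "def".toList)) = true →
      5 ≤ PySem.Str.find (PySem.Str.strip l) "(" := hgood
  cases hdw : cs.dropWhile (fun l => !pvStartsDefOrAt l) with
  | nil => exact absurd hdw hne'
  | cons l0 rest =>
    rw [hdw] at hd'
    simp only [List.headD_cons] at hd'
    have hfind : ¬ (PySem.Str.find l0 "d" < 0) := by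
      have hge : (-1 : Int) ≤ PySem.Str.find l0 "d" := by
        simp only [PySem.Str.find_eq]
        exact PySem.Chars.neg_one_le_find _ _
      omega
    rw [hdw] at hgood'
    simp only [List.headD_cons] at hgood'
    have hG : ∀ l ∈ l0 :: rest,
        pvGoodL (String.ofList (List.replicate (PySem.Str.find l0 "d").toNat ' ')) l := by
      intro l hl hsw
      apply pvPreGood
      apply hgood' l hl
      rwa [pvDP_ofList] at hsw
    unfold split_class split_class_alt
    rw [pvHeaderLoop_eq cs [], hdw]
    simp only [if_neg hfind, List.nil_append]
    rw [pvIsStartB_eq, pvDrop_findIdx pvStartsDefOrAt cs, pvTake_findIdx pvStartsDefOrAt cs, hdw]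
    simp only [if_neg hfind]
    rw [← pvDP_ofList, ← pvDC_ofList,
      pvMain (String.ofList (List.replicate (PySem.Str.find l0 "d").toNat ' '))
        (l0 :: rest).length (l0 :: rest) (le_refl _) hG]
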